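-- pv_equiv track=rewrite | github.com/animicaorg/all | studio-services/studio_services/security/rate_limit.py | _split_env_list
-- ===== SOURCE A (Python) =====
-- from typing import Dict, Optional, Tuple, Callable, Awaitable, Any, List
--
-- def _split_env_list(s: str) -> List[str]:
--     s = s.replace("\r", "\n")
--     parts: List[str] = []
--     for line in s.split("\n"):
--         for piece in line.split(";"):
--             piece = piece.strip()
--             if piece:
--                 parts.append(piece)
--     return parts
-- ===== SOURCE B (Python) =====
-- from typing import List
--
--
-- def _split_env_list(s: str) -> List[str]:
--     # Single pass over the characters: flush the current buffer at every
--     # delimiter (';', '\r', '\n'); no replace() pass and no nested splits.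
--     parts: List[str] = []
--     buf: List[str] = []
--     for ch in s:
--         if ch in ";\r\n":
--             tok = "".join(buf).strip()
--             if tok:
--                 parts.append(tok)
--             buf = []
--         else:
--             buf.append(ch)
--     tok = "".join(buf).strip()
--     if tok:
--         parts.append(tok)
--     return parts
-- ===== Notes on version B (the rewrite author's own statement) =====
-- stated objective: alternative
-- what changed: Replaced the replace-then-nested-split pipeline (normalize \r to \n, split on newlines, split each line on ';', strip/filter) with a single left-to-right character scan that accumulates a buffer and flushes a stripped token at every delimiter.
import Mathlib
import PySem

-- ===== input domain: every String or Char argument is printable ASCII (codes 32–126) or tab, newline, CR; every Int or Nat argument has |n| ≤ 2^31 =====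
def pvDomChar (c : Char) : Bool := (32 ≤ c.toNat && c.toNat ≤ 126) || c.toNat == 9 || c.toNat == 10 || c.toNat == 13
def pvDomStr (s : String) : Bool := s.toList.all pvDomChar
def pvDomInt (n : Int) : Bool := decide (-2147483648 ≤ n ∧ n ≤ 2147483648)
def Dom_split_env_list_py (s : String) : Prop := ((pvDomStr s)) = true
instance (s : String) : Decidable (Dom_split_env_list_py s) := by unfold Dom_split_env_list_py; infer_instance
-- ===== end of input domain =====

-- B replaces A's replace-then-nested-split pipeline by a single character scan
-- that flushes a stripped buffer at each delimiter (alternative decomposition).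

-- ===== PORT A =====
-- s.split(sep) for a nonempty literal sep (split? is none only for sep = "")
def pvStrSplit (s sep : String) : List String := (PySem.Str.split? s sep).getD []

def split_env_list_py (s : String) : List String :=
  let s1 := PySem.Str.replace s "\r" "\n"
  (pvStrSplit s1 "\n").foldl (fun parts line =>
    (pvStrSplit line ";").foldl (fun parts piece =>
      let p := PySem.Str.strip piece
      if p ≠ "" then parts ++ [p] else parts) parts) []

-- ===== PORT B =====
def pvFlush (parts : List String) (buf : List Char) : List String :=
  let tok := PySem.Str.strip (String.ofList buf)
  if tok ≠ "" then parts ++ [tok] else parts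

def pvStep (st : List String × List Char) (ch : Char) : List String × List Char :=
  if ch = ';' ∨ ch = '\r' ∨ ch = '\n' then (pvFlush st.1 st.2, [])
  else (st.1, st.2 ++ [ch])

def split_env_list_py_alt (s : String) : List String :=
  let st := s.toList.foldl pvStep ([], [])
  pvFlush st.1 st.2

-- ===== PRECONDITION & SPEC =====
def Spec_split_env_list_py (s : String) (out : List String) : Prop := out = split_env_list_py_alt s
instance (s : String) (out : List String) : Decidable (Spec_split_env_list_py s out) := by unfold Spec_split_env_list_py; infer_instance

-- ===== CLAIM (what is proved, stated in full; the proofs are below) =====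
def Claim_equal_split_env_list_py : Prop := ∀ (s : String), Dom_split_env_list_py s → Spec_split_env_list_py s (split_env_list_py s)

-- ===== LEMMAS AND PROOFS =====

-- simple one-character splitter used only in the proofs
def pvSplitC (l : List Char) (c : Char) : List (List Char) :=
  match l with
  | [] => [[]]
  | d :: t =>
    if d = c then [] :: pvSplitC t c
    else match pvSplitC t c with
         | [] => [[d]]
         | h :: r => (d :: h) :: r

-- split at any of the three delimiters (what B's scan computes)
def pvSplitAny (l : List Char) : List (List Char) :=
  match l with
  | [] => [[]]
  | d :: t =>
    if d = ';' ∨ d = '\r' ∨ d = '\n' then [] :: pvSplitAny t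
    else match pvSplitAny t with
         | [] => [[d]]
         | h :: r => (d :: h) :: r

-- prepend a prefix to the first chunk
def pvConsH (p : List Char) : List (List Char) → List (List Char)
  | [] => [p]
  | h :: r => (p ++ h) :: r

def pvTok (l : List (List Char)) : List String :=
  (l.map (fun cs => String.ofList (PySem.Chars.strip cs))).filter (· ≠ "")

theorem pvSplitC_ne_nil (l : List Char) (c : Char) : pvSplitC l c ≠ [] := by
  cases l with
  | nil => simp [pvSplitC]
  | cons d t =>
    simp only [pvSplitC]
    split
    · simp
    · split <;> simp

theorem pvSplitAny_ne_nil (l : List Char) : pvSplitAny l ≠ [] := by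
  cases l with
  | nil => simp [pvSplitAny]
  | cons d t =>
    simp only [pvSplitAny]
    split
    · simp
    · split <;> simp

theorem pvReplace_go (fuel : Nat) (l acc : List Char) (h : l.length ≤ fuel) :
    PySem.Chars.replace.go ['\r'] ['\n'] fuel l acc
      = acc.reverse ++ l.map (fun c => if c = '\r' then '\n' else c) := by
  induction fuel generalizing l acc with
  | zero =>
    have : l = [] := by cases l <;> simp_all
    subst this; simp [PySem.Chars.replace.go]
  | succ f ih =>
    cases l with
    | nil => simp [PySem.Chars.replace.go]
    | cons c t =>
      simp only [PySem.Chars.replace.go]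
      by_cases hc : c = '\r'
      · subst hc
        rw [if_pos (by simp [List.isPrefixOf])]
        simp only [List.length, List.drop]
        rw [ih _ _ (by simpa using Nat.le_of_succ_le_succ h)]
        simp
      · rw [if_neg (by simp [List.isPrefixOf]; exact fun h' => hc h'.symm)]
        rw [ih _ _ (by simpa using Nat.le_of_succ_le_succ h)]
        simp [hc]
  
theorem pvReplace_char (l : List Char) :
    PySem.Chars.replace l ['\r'] ['\n'] = l.map (fun c => if c = '\r' then '\n' else c) := by
  simp only [PySem.Chars.replace]
  rw [if_neg (by simp)]
  simpa using pvReplace_go l.length l [] le_rfl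

theorem pvSplitOn_go (c : Char) (fuel : Nat) (l cur : List Char) (acc : List (List Char))
    (h : l.length < fuel) :
    PySem.Chars.splitOn.go [c] fuel l cur acc
      = acc.reverse ++ pvConsH cur.reverse (pvSplitC l c) := by
  induction fuel generalizing l cur acc with
  | zero => omega
  | succ f ih =>
    cases l with
    | nil => simp [PySem.Chars.splitOn.go, pvSplitC, pvConsH]
    | cons d t =>
      simp only [PySem.Chars.splitOn.go]
      by_cases hd : d = c
      · subst hd
        rw [if_pos (by simp [List.isPrefixOf])]
        simp only [List.length, List.drop]
        rw [ih _ _ _ (by simpa using Nat.lt_of_succ_lt_succ h)]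
        simp only [pvSplitC]
        rcases hne : pvSplitC t d with _ | ⟨h1, r1⟩
        · exact absurd hne (pvSplitC_ne_nil t d)
        · simp [pvConsH]
      · rw [if_neg (by simp [List.isPrefixOf]; exact fun h' => hd h'.symm)]
        rw [ih _ _ _ (by simpa using Nat.lt_of_succ_lt_succ h)]
        simp only [pvSplitC, if_neg hd]
        rcases hne : pvSplitC t c with _ | ⟨h1, r1⟩
        · exact absurd hne (pvSplitC_ne_nil t c)
        · simp [pvConsH]

theorem pvSplitOn_char (l : List Char) (c : Char) :
    PySem.Chars.splitOn l [c] = pvSplitC l c := by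
  simp only [PySem.Chars.splitOn]
  rw [pvSplitOn_go c (l.length + 1) l [] [] (by omega)]
  rcases hne : pvSplitC l c with _ | ⟨h1, r1⟩
  · exact absurd hne (pvSplitC_ne_nil l c)
  · simp [pvConsH]

-- A's two-level split composes to the one-pass any-delimiter split
theorem pvSplit_compose (l : List Char) :
    (pvSplitC (l.map (fun c => if c = '\r' then '\n' else c)) '\n').flatMap
        (fun line => pvSplitC line ';') = pvSplitAny l := by
  induction l with
  | nil => decide
  | cons d t ih =>
    rcases hne : pvSplitC (t.map (fun c => if c = '\r' then '\n' else c)) '\n' with _ | ⟨h, r⟩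
    · exact absurd hne (pvSplitC_ne_nil _ _)
    rw [hne, List.flatMap_cons] at ih
    by_cases hnl : d = '\r' ∨ d = '\n'
    · have hfd : (if d = '\r' then '\n' else d) = '\n' := by
        rcases hnl with h' | h' <;> simp [h']
      rw [List.map_cons, hfd]
      simp only [pvSplitC, hne]
      rw [pvSplitAny, if_pos (Or.inr hnl), ← ih]
      rfl
    · rw [not_or] at hnl
      obtain ⟨hnl1, hnl2⟩ := hnl
      by_cases hsc : d = ';'
      · subst hsc
        rw [List.map_cons, if_neg (by decide)]
        simp only [pvSplitC, if_neg (by decide : ¬ (';' = '\n')), hne, List.flatMap_cons]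
        rw [pvSplitAny, if_pos (Or.inl rfl), ← ih]
        rfl
      · have hfd : (if d = '\r' then '\n' else d) = d := if_neg hnl1
        rw [List.map_cons, hfd]
        simp only [pvSplitC, if_neg hnl2, hne, if_neg hsc, List.flatMap_cons]
        rcases hne2 : pvSplitC h ';' with _ | ⟨h2, r2⟩
        · exact absurd hne2 (pvSplitC_ne_nil _ _)
        rw [hne2] at ih
        rw [pvSplitAny, if_neg (by tauto), ← ih]
        simp

-- bridges between Str-level and Chars-level strip
theorem pvStrip_ofList (cs : List Char) :
    PySem.Str.strip (String.ofList cs) = String.ofList (PySem.Chars.strip cs) := by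
  simp [PySem.Str.strip, String.toList_ofList]

theorem pvTok_nil : pvTok [] = [] := rfl

theorem pvTok_cons (cs : List Char) (r : List (List Char)) :
    pvTok (cs :: r)
      = (if String.ofList (PySem.Chars.strip cs) = "" then []
         else [String.ofList (PySem.Chars.strip cs)]) ++ pvTok r := by
  simp only [pvTok, List.map_cons, List.filter_cons]
  by_cases h : String.ofList (PySem.Chars.strip cs) = "" <;> simp [h]

theorem pvTok_append (X Y : List (List Char)) : pvTok (X ++ Y) = pvTok X ++ pvTok Y := by
  simp [pvTok, List.filter_append]

theorem pvFlush_eq (parts : List String) (buf : List Char) :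
    pvFlush parts buf = parts ++ pvTok [buf] := by
  rw [pvTok_cons, pvTok_nil]
  simp only [pvFlush, pvStrip_ofList, List.append_nil]
  by_cases h : String.ofList (PySem.Chars.strip buf) = "" <;> simp [h]

-- B's scan computes parts ++ pvTok (pvConsH buf (pvSplitAny l))
theorem pvB_invariant (l : List Char) (parts : List String) (buf : List Char) :
    (let st := l.foldl pvStep (parts, buf); pvFlush st.1 st.2)
      = parts ++ pvTok (pvConsH buf (pvSplitAny l)) := by
  induction l generalizing parts buf with
  | nil =>
    simp only [List.foldl_nil, pvSplitAny, pvConsH, List.append_nil]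
    exact pvFlush_eq parts buf
  | cons d t ih =>
    simp only [List.foldl_cons, pvStep]
    by_cases hd : d = ';' ∨ d = '\r' ∨ d = '\n'
    · rw [if_pos hd]
      rw [ih]
      rcases hne : pvSplitAny t with _ | ⟨h1, r1⟩
      · exact absurd hne (pvSplitAny_ne_nil t)
      rw [pvSplitAny, if_pos hd, hne]
      simp only [pvConsH, List.nil_append]
      rw [pvFlush_eq]
      simp [pvTok_cons, pvTok_nil, List.append_assoc]
    · rw [if_neg hd]
      rw [ih]
      rcases hne : pvSplitAny t with _ | ⟨h1, r1⟩
      · exact absurd hne (pvSplitAny_ne_nil t)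
      rw [pvSplitAny, if_neg hd, hne]
      simp [pvConsH, List.append_assoc]

theorem pvTok_flatMap (X : List (List Char)) (g : List Char → List (List Char)) :
    pvTok (X.flatMap g) = X.flatMap (fun cs => pvTok (g cs)) := by
  induction X with
  | nil => rfl
  | cons h r ih => rw [List.flatMap_cons, List.flatMap_cons, pvTok_append, ih]

-- s.split(sep) at the Chars level, for nonempty sep
theorem pvStrSplit_eq (u sep : String) (hsep : sep.toList ≠ []) :
    pvStrSplit u sep = (PySem.Chars.splitOn u.toList sep.toList).map String.ofList := by
  have hmap := PySem.Str.split?_map u sep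
  rw [PySem.Chars.split?, if_neg (by simpa [List.isEmpty_iff] using hsep)] at hmap
  rcases hs : PySem.Str.split? u sep with _ | L
  · rw [hs] at hmap; simp at hmap
  · rw [hs] at hmap
    simp only [Option.map_some, Option.some.injEq] at hmap
    rw [pvStrSplit, hs, Option.getD_some, ← hmap, List.map_map]
    simp [Function.comp_def, String.ofList_toList]

theorem pvA_eq (s : String) :
    split_env_list_py s = pvTok (pvSplitAny s.toList) := by
  simp only [split_env_list_py]
  rw [pvStrSplit_eq _ "\n" (by decide)]
  have hrep : (PySem.Str.replace s "\r" "\n").toList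
      = s.toList.map (fun c => if c = '\r' then '\n' else c) := by
    rw [PySem.Str.toList_replace]
    exact pvReplace_char s.toList
  rw [hrep]
  have hchunk : ∀ (parts : List String) (cs : List Char),
      (pvStrSplit (String.ofList cs) ";").foldl (fun parts piece =>
        let p := PySem.Str.strip piece
        if p ≠ "" then parts ++ [p] else parts) parts
      = parts ++ pvTok (pvSplitC cs ';') := by
    intro parts cs
    rw [pvStrSplit_eq _ ";" (by decide)]
    rw [PySem.List.foldl_append_ite (fun piece => PySem.Str.strip piece ≠ "")
      (fun piece => PySem.Str.strip piece)]
    rw [String.toList_ofList, show (";" : String).toList = [';'] from by decide, pvSplitOn_char]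
    congr 1
    rw [List.filter_map, List.map_map]
    simp only [pvTok, Function.comp_def, pvStrip_ofList]
    rw [List.filter_map]
    simp [Function.comp_def]
  have : ∀ (parts : List String) (chunks : List (List Char)),
      (chunks.map String.ofList).foldl (fun parts line =>
        (pvStrSplit line ";").foldl (fun parts piece =>
          let p := PySem.Str.strip piece
          if p ≠ "" then parts ++ [p] else parts) parts) parts
      = parts ++ pvTok (chunks.flatMap (fun cs => pvSplitC cs ';')) := by
    intro parts chunks
    induction chunks generalizing parts with
    | nil => simp [pvTok]
    | cons c r ih =>
      rw [List.map_cons, List.foldl_cons, hchunk, ih, List.flatMap_cons, pvTok_append,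
        List.append_assoc]
  rw [show ("\n" : String).toList = ['\n'] from by decide, pvSplitOn_char, this]
  rw [← pvSplit_compose s.toList]
  rw [pvTok_flatMap]
  simp

theorem pvB_eq (s : String) :
    split_env_list_py_alt s = pvTok (pvSplitAny s.toList) := by
  have := pvB_invariant s.toList [] []
  simp only [split_env_list_py_alt]
  rw [this]
  rcases hne : pvSplitAny s.toList with _ | ⟨h1, r1⟩
  · exact absurd hne (pvSplitAny_ne_nil _)
  · simp [pvConsH]

-- ===== VERDICT (by name: the statement is the Claim_ definition above) =====
theorem split_env_list_py_spec : Claim_equal_split_env_list_py := by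
  intro s _
  unfold Spec_split_env_list_py
  rw [pvA_eq, pvB_eq]
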